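-- pv_equiv track=rewrite | github.com/waterhyun/PuddingBank | django-pjt/products/views.py | calculate_mbti_type
-- ===== SOURCE A (Python) =====
-- def calculate_mbti_type(answers):
--     """MBTI 유형 계산"""
--     # 초기 질문으로 대출 종류 결정
--     initial_scores = [answers.get(f'initial_q{i}', 2) for i in range(1, 4)]
--     loan_type = determine_loan_type(initial_scores)
--
--     try:
--         if loan_type == 'M':
--             return 'M' + calculate_mortgage_type(answers)
--         else:
--             return 'L' + calculate_lease_type(answers)
--     except KeyError as e:
--         raise ValueError(f'필수 답변이 누락되었습니다: {str(e)}')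
--
-- def determine_loan_type(initial_scores):
--     """대출 종류 결정 (M/L)"""
--     # 첫 번째 질문 점수가 높으면 주택담보대출
--     # 세 번째 질문 점수가 높으면 전세자금대출
--     mortgage_score = initial_scores[0]  # "내 소유의 집을 마련하는 것이 목표이다"
--     lease_score = initial_scores[2]     # "전세 보증금 마련이 우선이다"
--
--     return 'M' if mortgage_score > lease_score else 'L'
--
-- def calculate_mortgage_type(answers):
--     """주택담보대출 MBTI 계산"""
--     mbti = ''
--
--     # F/V (Fixed/Variable) - 금리 선호도
--     rate_scores = [
--         answers.get('fv_q1', 2),  # "금리가 변동될 수 있다는 생각만으로도 불안하다"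
--         answers.get('fv_q2', 2),  # "원금이 조금 더 들더라도 고정금리가 좋다"
--         answers.get('fv_q3', 2)   # "시장 금리가 떨어질 수 있는 기회는 포기하고 싶지 않다"
--     ]
--     # 마지막 질문은 역산
--     rate_scores[2] = 4 - rate_scores[2]
--     mbti += 'F' if sum(rate_scores) > 6 else 'V'
--
--     # P/D (Payment/Divide) - 상환 방식
--     payment_scores = [
--         answers.get('pd_q1', 2),  # "매달 고정적으로 갚아나가는 것이 편하다"
--         answers.get('pd_q2', 2),  # "대출 상환 계획은 처음부터 명확히 세우고 싶다"
--         answers.get('pd_q3', 2)   # "목돈이 생기면 수시로 상환하고 싶다"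
--     ]
--     # 마지막 질문은 역산
--     payment_scores[2] = 4 - payment_scores[2]
--     mbti += 'P' if sum(payment_scores) > 6 else 'D'
--
--     # A/H (Apartment/House) - 담보 유형
--     property_scores = [
--         answers.get('ah_q1', 2),  # "아파트의 안정성이 가장 중요하다"
--         answers.get('ah_q2', 2),  # "관리비를 내더라도 체계적인 관리가 필요하다"
--         answers.get('ah_q3', 2)   # "단독주택이나 상가의 투자가치가 더 매력적이다"
--     ]
--     # 마지막 질문은 역산
--     property_scores[2] = 4 - property_scores[2]
--     mbti += 'A' if sum(property_scores) > 6 else 'H'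
--
--     return mbti
--
-- def calculate_lease_type(answers):
--     """전세자금대출 MBTI 계산"""
--     mbti = ''
--
--     # F/V (Fixed/Variable) - 금리 선호도 (주택담보대출과 동일한 질문 사용)
--     rate_scores = [
--         answers.get('fv_q1', 2),
--         answers.get('fv_q2', 2),
--         answers.get('fv_q3', 2)
--     ]
--     rate_scores[2] = 4 - rate_scores[2]
--     mbti += 'F' if sum(rate_scores) > 6 else 'V'
--
--     # T/S (Term/Short) - 기간
--     term_scores = [
--         answers.get('ts_q1', 2),  # "2년 이상 한 곳에 거주할 계획이다"
--         answers.get('ts_q2', 2),  # "주거비용의 안정성이 가장 중요하다"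
--         answers.get('ts_q3', 2)   # "필요하면 언제든 이사할 수 있어야 한다"
--     ]
--     # 마지막 질문은 역산
--     term_scores[2] = 4 - term_scores[2]
--     mbti += 'T' if sum(term_scores) > 6 else 'S'
--
--     # G/P (Government/Private) - 보증 유형
--     guarantee_scores = [
--         answers.get('gp_q1', 2),  # "보증료를 내더라도 안전한 상품이 좋다"
--         answers.get('gp_q2', 2),  # "정부 지원 상품을 이용하고 싶다"
--         answers.get('gp_q3', 2)   # "절차가 복잡해도 안전한게 중요하다"
--     ]
--     mbti += 'G' if sum(guarantee_scores) > 6 else 'P'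
--
--     return mbti
-- ===== SOURCE B (Python) =====
-- def calculate_mbti_type(answers):
--     """Single pass over the answers: accumulate each axis's signed deviation
--     from the neutral score 2, then read every letter off as 'deviation > 0'."""
--     i = f = p = a = t = g = 0
--     for k, v in answers.items():
--         d = v - 2
--         if k == 'initial_q1':
--             i += d
--         elif k == 'initial_q3':
--             i -= d
--         elif k == 'fv_q1' or k == 'fv_q2':
--             f += d
--         elif k == 'fv_q3':
--             f -= d
--         elif k == 'pd_q1' or k == 'pd_q2':
--             p += d
--         elif k == 'pd_q3':
--             p -= d
--         elif k == 'ah_q1' or k == 'ah_q2':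
--             a += d
--         elif k == 'ah_q3':
--             a -= d
--         elif k == 'ts_q1' or k == 'ts_q2':
--             t += d
--         elif k == 'ts_q3':
--             t -= d
--         elif k == 'gp_q1' or k == 'gp_q2' or k == 'gp_q3':
--             g += d
--     if i > 0:
--         return 'M' + ('F' if f > 0 else 'V') + ('P' if p > 0 else 'D') + ('A' if a > 0 else 'H')
--     return 'L' + ('F' if f > 0 else 'V') + ('T' if t > 0 else 'S') + ('G' if g > 0 else 'P')
-- ===== Notes on version B (the rewrite author's own statement) =====
-- stated objective: alternative
-- what changed: Instead of looking up each axis's three keys and testing sum-with-reversal > 6, B makes a single pass over answers.items(), accumulating one signed deviation-from-the-neutral-score-2 per axis (last key weighted -1 on reversed axes), and reads every letter off as 'deviation > 0'; Pre_ only excludes association lists with duplicate keys, which do not represent any Python dict (dict keys are unique).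
import Mathlib
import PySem

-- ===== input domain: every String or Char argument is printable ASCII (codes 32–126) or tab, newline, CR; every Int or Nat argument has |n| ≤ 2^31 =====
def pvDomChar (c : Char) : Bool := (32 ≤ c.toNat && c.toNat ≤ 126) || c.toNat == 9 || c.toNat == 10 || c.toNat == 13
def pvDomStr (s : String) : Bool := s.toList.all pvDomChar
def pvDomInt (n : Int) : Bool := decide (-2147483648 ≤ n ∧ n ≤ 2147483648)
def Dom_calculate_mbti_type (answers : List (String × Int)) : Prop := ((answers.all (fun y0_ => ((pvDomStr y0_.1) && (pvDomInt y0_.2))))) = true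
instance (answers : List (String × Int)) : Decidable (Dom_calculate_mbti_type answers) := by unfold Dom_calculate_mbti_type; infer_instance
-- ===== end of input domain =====

-- B replaces A's per-axis lookups-and-sum-with-reversal tests by a single pass over the dict's items accumulating one signed deviation-from-2 per axis; objective: alternative (return value only; neither mutates).


-- ===== PORT A =====
def determine_loan_type (initial_scores : List Int) : String :=
  let mortgage_score := (PySem.List.pyGet? initial_scores 0).getD 0
  let lease_score := (PySem.List.pyGet? initial_scores 2).getD 0
  if mortgage_score > lease_score then "M" else "L"

def calculate_mortgage_type (answers : PySem.Dict String Int) : String :=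
  let mbti := ""
  let rate_scores := [answers.getD "fv_q1" 2, answers.getD "fv_q2" 2, answers.getD "fv_q3" 2]
  let rate_scores := PySem.List.pySetD rate_scores 2 (4 - (PySem.List.pyGet? rate_scores 2).getD 0)
  let mbti := mbti ++ (if rate_scores.sum > 6 then "F" else "V")
  let payment_scores := [answers.getD "pd_q1" 2, answers.getD "pd_q2" 2, answers.getD "pd_q3" 2]
  let payment_scores := PySem.List.pySetD payment_scores 2 (4 - (PySem.List.pyGet? payment_scores 2).getD 0)
  let mbti := mbti ++ (if payment_scores.sum > 6 then "P" else "D")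
  let property_scores := [answers.getD "ah_q1" 2, answers.getD "ah_q2" 2, answers.getD "ah_q3" 2]
  let property_scores := PySem.List.pySetD property_scores 2 (4 - (PySem.List.pyGet? property_scores 2).getD 0)
  let mbti := mbti ++ (if property_scores.sum > 6 then "A" else "H")
  mbti

def calculate_lease_type (answers : PySem.Dict String Int) : String :=
  let mbti := ""
  let rate_scores := [answers.getD "fv_q1" 2, answers.getD "fv_q2" 2, answers.getD "fv_q3" 2]
  let rate_scores := PySem.List.pySetD rate_scores 2 (4 - (PySem.List.pyGet? rate_scores 2).getD 0)
  let mbti := mbti ++ (if rate_scores.sum > 6 then "F" else "V")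
  let term_scores := [answers.getD "ts_q1" 2, answers.getD "ts_q2" 2, answers.getD "ts_q3" 2]
  let term_scores := PySem.List.pySetD term_scores 2 (4 - (PySem.List.pyGet? term_scores 2).getD 0)
  let mbti := mbti ++ (if term_scores.sum > 6 then "T" else "S")
  let guarantee_scores := [answers.getD "gp_q1" 2, answers.getD "gp_q2" 2, answers.getD "gp_q3" 2]
  let mbti := mbti ++ (if guarantee_scores.sum > 6 then "G" else "P")
  mbti

-- the try/except KeyError in A can never fire (every lookup has a default), so it is not modelled
def calculate_mbti_type (answers : List (String × Int)) : String :=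
  let d := PySem.Dict.mk answers
  let initial_scores := (PySem.List.pyRange 1 4 1).map (fun i => d.getD ("initial_q" ++ PySem.Int.toStr i) 2)
  let loan_type := determine_loan_type initial_scores
  if loan_type == "M" then "M" ++ calculate_mortgage_type d
  else "L" ++ calculate_lease_type d

-- ===== PORT B =====
-- loop body of Source B: one if/elif chain updating the six per-axis deviation accumulators
def pvStep (acc : Int × Int × Int × Int × Int × Int) (kv : String × Int) : Int × Int × Int × Int × Int × Int :=
  let dl := kv.2 - 2
  match acc with
  | (i, f, p, a, t, g) =>
    if kv.1 = "initial_q1" then (i + dl, f, p, a, t, g)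
    else if kv.1 = "initial_q3" then (i - dl, f, p, a, t, g)
    else if kv.1 = "fv_q1" ∨ kv.1 = "fv_q2" then (i, f + dl, p, a, t, g)
    else if kv.1 = "fv_q3" then (i, f - dl, p, a, t, g)
    else if kv.1 = "pd_q1" ∨ kv.1 = "pd_q2" then (i, f, p + dl, a, t, g)
    else if kv.1 = "pd_q3" then (i, f, p - dl, a, t, g)
    else if kv.1 = "ah_q1" ∨ kv.1 = "ah_q2" then (i, f, p, a + dl, t, g)
    else if kv.1 = "ah_q3" then (i, f, p, a - dl, t, g)
    else if kv.1 = "ts_q1" ∨ kv.1 = "ts_q2" then (i, f, p, a, t + dl, g)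
    else if kv.1 = "ts_q3" then (i, f, p, a, t - dl, g)
    else if kv.1 = "gp_q1" ∨ kv.1 = "gp_q2" ∨ kv.1 = "gp_q3" then (i, f, p, a, t, g + dl)
    else (i, f, p, a, t, g)

def calculate_mbti_type_alt (answers : List (String × Int)) : String :=
  match (PySem.Dict.mk answers).items.foldl pvStep (0, 0, 0, 0, 0, 0) with
  | (i, f, p, a, t, g) =>
    if i > 0 then
      "M" ++ (if f > 0 then "F" else "V") ++ (if p > 0 then "P" else "D") ++ (if a > 0 then "A" else "H")
    else
      "L" ++ (if f > 0 then "F" else "V") ++ (if t > 0 then "T" else "S") ++ (if g > 0 then "G" else "P")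

-- ===== PRECONDITION & SPEC =====
-- Pre_ excludes only association lists with a duplicated key: they do not represent any Python
-- dict (dict keys are unique), so no Python input is excluded; A never raises on a dict.
def Pre_calculate_mbti_type (answers : List (String × Int)) : Prop := (answers.map Prod.fst).Nodup
instance (answers : List (String × Int)) : Decidable (Pre_calculate_mbti_type answers) := by unfold Pre_calculate_mbti_type; infer_instance
def pvWitness_calculate_mbti_type : (List (String × Int)) := [("initial_q1", 3), ("fv_q1", 0)]

def Spec_calculate_mbti_type (answers : List (String × Int)) (out : String) : Prop := out = calculate_mbti_type_alt answers
instance (answers : List (String × Int)) (out : String) : Decidable (Spec_calculate_mbti_type answers out) := by unfold Spec_calculate_mbti_type; infer_instance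

-- ===== CLAIM (what is proved, stated in full; the proofs are below) =====
def Claim_equal_calculate_mbti_type : Prop := ∀ (answers : List (String × Int)), Dom_calculate_mbti_type answers → Pre_calculate_mbti_type answers → Spec_calculate_mbti_type answers (calculate_mbti_type answers)

-- ===== LEMMAS AND PROOFS =====
-- per-key contribution selector: the deviation of kv's value from 2 if its key is K, else 0
def pvSel (K : String) (kv : String × Int) : Int := if kv.1 = K then kv.2 - 2 else 0

-- one loop step adds each axis's signed per-key contribution
theorem pvStep_eq (s : Int × Int × Int × Int × Int × Int) (kv : String × Int) :
    pvStep s kv =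
      (s.1 + (pvSel "initial_q1" kv - pvSel "initial_q3" kv),
       s.2.1 + (pvSel "fv_q1" kv + pvSel "fv_q2" kv - pvSel "fv_q3" kv),
       s.2.2.1 + (pvSel "pd_q1" kv + pvSel "pd_q2" kv - pvSel "pd_q3" kv),
       s.2.2.2.1 + (pvSel "ah_q1" kv + pvSel "ah_q2" kv - pvSel "ah_q3" kv),
       s.2.2.2.2.1 + (pvSel "ts_q1" kv + pvSel "ts_q2" kv - pvSel "ts_q3" kv),
       s.2.2.2.2.2 + (pvSel "gp_q1" kv + pvSel "gp_q2" kv + pvSel "gp_q3" kv)) := by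
  obtain ⟨i, f, p, a, t, g⟩ := s
  obtain ⟨k, v⟩ := kv
  simp only [pvStep]
  by_cases h1 : k = "initial_q1"
  · rw [if_pos h1]; subst h1; simp [pvSel]
  rw [if_neg h1]
  by_cases h2 : k = "initial_q3"
  · rw [if_pos h2]; subst h2; simp [pvSel]; ring
  rw [if_neg h2]
  by_cases h3 : k = "fv_q1" ∨ k = "fv_q2"
  · rw [if_pos h3]; rcases h3 with h | h <;> subst h <;> simp [pvSel]
  rw [if_neg h3]
  by_cases h4 : k = "fv_q3"
  · rw [if_pos h4]; subst h4; simp [pvSel]; ring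
  rw [if_neg h4]
  by_cases h5 : k = "pd_q1" ∨ k = "pd_q2"
  · rw [if_pos h5]; rcases h5 with h | h <;> subst h <;> simp [pvSel]
  rw [if_neg h5]
  by_cases h6 : k = "pd_q3"
  · rw [if_pos h6]; subst h6; simp [pvSel]; ring
  rw [if_neg h6]
  by_cases h7 : k = "ah_q1" ∨ k = "ah_q2"
  · rw [if_pos h7]; rcases h7 with h | h <;> subst h <;> simp [pvSel]
  rw [if_neg h7]
  by_cases h8 : k = "ah_q3"
  · rw [if_pos h8]; subst h8; simp [pvSel]; ring
  rw [if_neg h8]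
  by_cases h9 : k = "ts_q1" ∨ k = "ts_q2"
  · rw [if_pos h9]; rcases h9 with h | h <;> subst h <;> simp [pvSel]
  rw [if_neg h9]
  by_cases h10 : k = "ts_q3"
  · rw [if_pos h10]; subst h10; simp [pvSel]; ring
  rw [if_neg h10]
  by_cases h11 : k = "gp_q1" ∨ k = "gp_q2" ∨ k = "gp_q3"
  · rw [if_pos h11]; rcases h11 with h | h | h <;> subst h <;> simp [pvSel]
  rw [if_neg h11]
  push Not at h3 h5 h7 h9 h11
  simp [pvSel, h1, h2, h3.1, h3.2, h4, h5.1, h5.2, h6, h7.1, h7.2, h8, h9.1, h9.2, h10, h11.1, h11.2.1, h11.2.2]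

-- the whole fold computes, per axis, the sum of per-key contributions
theorem pvFold (l : List (String × Int)) (s : Int × Int × Int × Int × Int × Int) :
    l.foldl pvStep s =
      (s.1 + ((l.map (pvSel "initial_q1")).sum - (l.map (pvSel "initial_q3")).sum),
       s.2.1 + ((l.map (pvSel "fv_q1")).sum + (l.map (pvSel "fv_q2")).sum - (l.map (pvSel "fv_q3")).sum),
       s.2.2.1 + ((l.map (pvSel "pd_q1")).sum + (l.map (pvSel "pd_q2")).sum - (l.map (pvSel "pd_q3")).sum),
       s.2.2.2.1 + ((l.map (pvSel "ah_q1")).sum + (l.map (pvSel "ah_q2")).sum - (l.map (pvSel "ah_q3")).sum),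
       s.2.2.2.2.1 + ((l.map (pvSel "ts_q1")).sum + (l.map (pvSel "ts_q2")).sum - (l.map (pvSel "ts_q3")).sum),
       s.2.2.2.2.2 + ((l.map (pvSel "gp_q1")).sum + (l.map (pvSel "gp_q2")).sum + (l.map (pvSel "gp_q3")).sum)) := by
  induction l generalizing s with
  | nil => simp
  | cons kv l ih =>
    simp only [List.foldl_cons, List.map_cons, List.sum_cons, ih, pvStep_eq]
    obtain ⟨i, f, p, a, t, g⟩ := s
    simp only [Prod.mk.injEq]
    refine ⟨by ring, by ring, by ring, by ring, by ring, by ring⟩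

-- summing a single-key selector over a nodup key list picks out that key's term (or 0)
theorem pvSumIf (ks : List String) (h : ks.Nodup) (K : String) (g : String → Int) :
    (ks.map (fun k => if k = K then g k else 0)).sum = if K ∈ ks then g K else 0 := by
  induction ks with
  | nil => simp
  | cons k ks ih =>
    rcases List.nodup_cons.mp h with ⟨hk, hks⟩
    by_cases hkK : k = K
    · subst hkK
      simp [ih hks, hk]
    · simp [hkK, ih hks, Ne.symm hkK]

-- the contribution sum over a dict's items is the deviation of that key's looked-up value
theorem pvSumSel (d : PySem.Dict String Int) (h : d.keys.Nodup) (K : String) :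
    (d.items.map (pvSel K)).sum = d.getD K 2 - 2 := by
  rw [PySem.Dict.items_eq_map_keys d h 2, List.map_map]
  have heq : ((pvSel K) ∘ fun k => (k, d.getD k 2)) = fun k => if k = K then d.getD k 2 - 2 else 0 := by
    funext k; simp [pvSel]
  rw [heq, pvSumIf d.keys h K]
  by_cases hm : K ∈ d.keys
  · simp [hm]
  · have hc : d.contains K = false := by
      cases hc : d.contains K
      · rfl
      · exact absurd ((PySem.Dict.contains_iff_mem_keys d K).mp hc) hm
    simp [hm, PySem.Dict.getD_of_not_contains d 2 hc]

-- ===== VERDICT (by name: the statement is the Claim_ definition above) =====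
theorem calculate_mbti_type_spec : Claim_equal_calculate_mbti_type := by
  intro answers _ hpre
  unfold Spec_calculate_mbti_type calculate_mbti_type calculate_mbti_type_alt
    determine_loan_type calculate_mortgage_type calculate_lease_type
  have hnd : (PySem.Dict.mk answers).keys.Nodup := hpre
  rw [pvFold]
  rw [pvSumSel _ hnd "initial_q1", pvSumSel _ hnd "initial_q3",
      pvSumSel _ hnd "fv_q1", pvSumSel _ hnd "fv_q2", pvSumSel _ hnd "fv_q3",
      pvSumSel _ hnd "pd_q1", pvSumSel _ hnd "pd_q2", pvSumSel _ hnd "pd_q3",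
      pvSumSel _ hnd "ah_q1", pvSumSel _ hnd "ah_q2", pvSumSel _ hnd "ah_q3",
      pvSumSel _ hnd "ts_q1", pvSumSel _ hnd "ts_q2", pvSumSel _ hnd "ts_q3",
      pvSumSel _ hnd "gp_q1", pvSumSel _ hnd "gp_q2", pvSumSel _ hnd "gp_q3"]
  have hr : PySem.List.pyRange 1 4 1 = [1, 2, 3] := by decide
  have e1 : ("initial_q" ++ String.ofList (PySem.Int.toChars 1)) = "initial_q1" := by decide
  have e2 : ("initial_q" ++ String.ofList (PySem.Int.toChars 2)) = "initial_q2" := by decide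
  have e3 : ("initial_q" ++ String.ofList (PySem.Int.toChars 3)) = "initial_q3" := by decide
  simp only [hr, List.map_cons, List.map_nil, PySem.Int.toStr, e1, e2, e3]
  simp [PySem.List.pyGet?, PySem.List.pySetD, PySem.List.pySet?, PySem.List.pyIdx?]
  simp only [show ∀ x y z : Int, (z - 2 < x - 2 + (y - 2)) = (6 < x + (y + (4 - z))) from
               fun x y z => propext (by omega),
             show ∀ x y z : Int, ((0:Int) < x - 2 + (y - 2) + (z - 2)) = (6 < x + (y + z)) from
               fun x y z => propext (by omega)]
  split_ifs <;> rfl
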